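-- pv_equiv track=rewrite | github.com/LCDSP-webpage/lcdsp_code | language_control/single_player/natural_language_to_style.py | word_to_reward_factor
-- ===== SOURCE A (Python) =====
-- def word_to_reward_factor(result):
--     factors = {
--         'active_area_x': [0 ,0 ,0],
--         'active_area_y': [0 ,0 ,0],
--         'shot': [0, 0],
--         'move': [0, 0, 0]
--     }
--
--     choice_to_idx = {
--         "Front": 0,
--         "Midfield": 1,
--         "Back": 2,
--         "Left": 0,
--         "Center": 1,
--         "Right": 2,
--         "Run": 0,
--         "Dribble": 1,
--         "Goal Area": 0,
--         "Penalty Area": 1,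
--     }
--
--     for k, v in result.items():
--         if k == 'Horizontal Position':
--             for choice in v:
--                 if choice in ['Front', 'Midfield', 'Back']:
--                     idx = choice_to_idx[choice]
--                     factors['active_area_x'][idx] = 1
--         elif k == 'Vertical Position':
--             for choice in v:
--                 if choice in ['Left', 'Center', 'Right']:
--                     idx = choice_to_idx[choice]
--                     factors['active_area_y'][idx] = 1
--         elif k == 'Shooting Position':
--             for choice in v:
--                 if choice in ['Goal Area', 'Penalty Area']:
--                     idx = choice_to_idx[choice]
--                     factors['shot'][idx] = 1
--         elif k == 'Movement Action':
--             for choice in v: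
--                 if choice in ['Run', 'Dribble']:
--                     idx = choice_to_idx[choice]
--                     factors['move'][idx] = 1
--
--     return factors
-- ===== SOURCE B (Python) =====
-- # Each factor: (name, key in result, per-slot choice; None = slot never set).
-- _SPEC = [
--     ('active_area_x', 'Horizontal Position', ['Front', 'Midfield', 'Back']),
--     ('active_area_y', 'Vertical Position', ['Left', 'Center', 'Right']),
--     ('shot', 'Shooting Position', ['Goal Area', 'Penalty Area']),
--     ('move', 'Movement Action', ['Run', 'Dribble', None]),
-- ]
--
--
-- def word_to_reward_factor(result):
--     # Output-driven: each flag is computed independently as "was this choice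
--     # selected under this key?", instead of scanning the input and mutating
--     # a pre-built factors structure.
--     def flag(key, choice):
--         if choice is None:
--             return 0
--         return 1 if any(k == key and choice in v for k, v in result.items()) else 0
--
--     return {name: [flag(key, c) for c in choices] for name, key, choices in _SPEC}
-- ===== Notes on version B (the rewrite author's own statement) =====
-- stated objective: alternative
-- what changed: Inverts the computation from input-driven to output-driven: instead of scanning result and mutating a pre-built factors dict through a four-way if/elif dispatch, B builds the result afresh, computing each flag independently as an existence query ('does result map this key to a selection containing this choice?') over a declarative spec table.
import Mathlib
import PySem

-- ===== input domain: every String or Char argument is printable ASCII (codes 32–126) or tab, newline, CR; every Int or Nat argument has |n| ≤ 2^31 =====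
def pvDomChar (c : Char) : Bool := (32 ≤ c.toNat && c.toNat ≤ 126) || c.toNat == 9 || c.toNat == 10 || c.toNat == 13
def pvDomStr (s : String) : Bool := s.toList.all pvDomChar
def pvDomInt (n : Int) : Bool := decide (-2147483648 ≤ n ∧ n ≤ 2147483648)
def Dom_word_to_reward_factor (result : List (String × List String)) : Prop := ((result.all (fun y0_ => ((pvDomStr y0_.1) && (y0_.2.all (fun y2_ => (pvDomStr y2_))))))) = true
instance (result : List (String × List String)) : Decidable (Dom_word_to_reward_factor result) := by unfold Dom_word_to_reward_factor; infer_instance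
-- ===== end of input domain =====

-- B inverts A's input-driven mutation (scan result, four-way if/elif dispatch, set slots of a
-- pre-built factors dict) into an output-driven build: each flag is computed independently as an
-- existence query over result, driven by a declarative spec table. Objective: alternative.

-- ===== PORT A =====
def pvFactorsInit : PySem.Dict String (List Int) := PySem.Dict.mk
  [("active_area_x", [0, 0, 0]), ("active_area_y", [0, 0, 0]), ("shot", [0, 0]), ("move", [0, 0, 0])]

def pvChoiceToIdx : PySem.Dict String Nat := PySem.Dict.mk
  [("Front", 0), ("Midfield", 1), ("Back", 2), ("Left", 0), ("Center", 1), ("Right", 2),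
   ("Run", 0), ("Dribble", 1), ("Goal Area", 0), ("Penalty Area", 1)]

-- factors[name][idx] = 1 is List.set at idx (in range for every guarded choice);
-- choice_to_idx[choice] is getD: the membership guard ensures the key is present, so no KeyError.
def pvStepA (fs : PySem.Dict String (List Int)) (kv : String × List String) :
    PySem.Dict String (List Int) :=
  if kv.1 == "Horizontal Position" then
    kv.2.foldl (fun fs choice =>
      if choice ∈ (["Front", "Midfield", "Back"] : List String) then
        fs.modify "active_area_x" [] (fun l => l.set (pvChoiceToIdx.getD choice 0) 1)
      else fs) fs
  else if kv.1 == "Vertical Position" then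
    kv.2.foldl (fun fs choice =>
      if choice ∈ (["Left", "Center", "Right"] : List String) then
        fs.modify "active_area_y" [] (fun l => l.set (pvChoiceToIdx.getD choice 0) 1)
      else fs) fs
  else if kv.1 == "Shooting Position" then
    kv.2.foldl (fun fs choice =>
      if choice ∈ (["Goal Area", "Penalty Area"] : List String) then
        fs.modify "shot" [] (fun l => l.set (pvChoiceToIdx.getD choice 0) 1)
      else fs) fs
  else if kv.1 == "Movement Action" then
    kv.2.foldl (fun fs choice =>
      if choice ∈ (["Run", "Dribble"] : List String) then
        fs.modify "move" [] (fun l => l.set (pvChoiceToIdx.getD choice 0) 1)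
      else fs) fs
  else fs

def word_to_reward_factor (result : List (String × List String)) : List (String × List Int) :=
  (result.foldl pvStepA pvFactorsInit).items

-- ===== PORT B =====
-- _SPEC: (factor name, key in result, per-slot choice; none = slot never set)
def pvSpec : List (String × String × List (Option String)) :=
  [("active_area_x", "Horizontal Position", [some "Front", some "Midfield", some "Back"]),
   ("active_area_y", "Vertical Position", [some "Left", some "Center", some "Right"]),
   ("shot", "Shooting Position", [some "Goal Area", some "Penalty Area"]),
   ("move", "Movement Action", [some "Run", some "Dribble", none])]

def pvFlag (result : List (String × List String)) (key : String) (choice : Option String) : Int :=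
  match choice with
  | none => 0
  | some c => if result.any (fun kv => kv.1 == key && kv.2.contains c) then 1 else 0

-- the dict comprehension over pvSpec builds a dict with distinct fresh keys, whose
-- items are exactly this list in spec order
def word_to_reward_factor_alt (result : List (String × List String)) : List (String × List Int) :=
  pvSpec.map (fun s => (s.1, s.2.2.map (pvFlag result s.2.1)))

-- ===== PRECONDITION & SPEC =====
def Spec_word_to_reward_factor (result : List (String × List String)) (out : List (String × List Int)) : Prop := out = word_to_reward_factor_alt result
instance (result : List (String × List String)) (out : List (String × List Int)) : Decidable (Spec_word_to_reward_factor result out) := by unfold Spec_word_to_reward_factor; infer_instance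

-- ===== CLAIM (what is proved, stated in full; the proofs are below) =====
def Claim_equal_word_to_reward_factor : Prop := ∀ (result : List (String × List String)), Dom_word_to_reward_factor result → Spec_word_to_reward_factor result (word_to_reward_factor result)

-- ===== LEMMAS AND PROOFS =====

-- the shape every intermediate state of A's fold has
def pvMkD (a b c d e f g h i j k : Int) : PySem.Dict String (List Int) := PySem.Dict.mk
  [("active_area_x", [a, b, c]), ("active_area_y", [d, e, f]), ("shot", [g, h]), ("move", [i, j, k])]

-- "set to 1 if some later entry selects it, else keep"
def pvOr (result : List (String × List String)) (key c : String) (orig : Int) : Int :=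
  if result.any (fun kv => kv.1 == key && kv.2.contains c) then 1 else orig

theorem pvInnerH (v : List String) (a b c d e f g h i j k : Int) :
    v.foldl (fun fs choice =>
      if choice ∈ (["Front", "Midfield", "Back"] : List String) then
        fs.modify "active_area_x" [] (fun l => l.set (pvChoiceToIdx.getD choice 0) 1)
      else fs) (pvMkD a b c d e f g h i j k)
    = pvMkD (if "Front" ∈ v then 1 else a) (if "Midfield" ∈ v then 1 else b) (if "Back" ∈ v then 1 else c) d e f g h i j k := by
  induction v generalizing a b c with
  | nil => simp
  | cons x v ih =>
    rw [List.foldl_cons]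
    by_cases h1 : x = "Front"
    · subst h1
      rw [if_pos (by decide)]
      rw [show (pvMkD a b c d e f g h i j k).modify "active_area_x" [] (fun l => l.set (pvChoiceToIdx.getD "Front" 0) 1) = pvMkD 1 b c d e f g h i j k from by
        simp [pvMkD, pvChoiceToIdx, PySem.Dict.modify, PySem.Dict.insert, PySem.Dict.contains, PySem.Dict.getD, PySem.Dict.get?]]
      rw [ih]
      simp [pvMkD, List.mem_cons]
    by_cases h2 : x = "Midfield"
    · subst h2
      rw [if_pos (by decide)]
      rw [show (pvMkD a b c d e f g h i j k).modify "active_area_x" [] (fun l => l.set (pvChoiceToIdx.getD "Midfield" 0) 1) = pvMkD a 1 c d e f g h i j k from by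
        simp [pvMkD, pvChoiceToIdx, PySem.Dict.modify, PySem.Dict.insert, PySem.Dict.contains, PySem.Dict.getD, PySem.Dict.get?]]
      rw [ih]
      simp [pvMkD, List.mem_cons]
    by_cases h3 : x = "Back"
    · subst h3
      rw [if_pos (by decide)]
      rw [show (pvMkD a b c d e f g h i j k).modify "active_area_x" [] (fun l => l.set (pvChoiceToIdx.getD "Back" 0) 1) = pvMkD a b 1 d e f g h i j k from by
        simp [pvMkD, pvChoiceToIdx, PySem.Dict.modify, PySem.Dict.insert, PySem.Dict.contains, PySem.Dict.getD, PySem.Dict.get?]]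
      rw [ih]
      simp [pvMkD, List.mem_cons]
    rw [if_neg (by simp [h1, h2, h3])]
    rw [ih]
    simp [pvMkD, List.mem_cons, Ne.symm h1, Ne.symm h2, Ne.symm h3]

theorem pvInnerV (v : List String) (a b c d e f g h i j k : Int) :
    v.foldl (fun fs choice =>
      if choice ∈ (["Left", "Center", "Right"] : List String) then
        fs.modify "active_area_y" [] (fun l => l.set (pvChoiceToIdx.getD choice 0) 1)
      else fs) (pvMkD a b c d e f g h i j k)
    = pvMkD a b c (if "Left" ∈ v then 1 else d) (if "Center" ∈ v then 1 else e) (if "Right" ∈ v then 1 else f) g h i j k := by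
  induction v generalizing d e f with
  | nil => simp
  | cons x v ih =>
    rw [List.foldl_cons]
    by_cases h1 : x = "Left"
    · subst h1
      rw [if_pos (by decide)]
      rw [show (pvMkD a b c d e f g h i j k).modify "active_area_y" [] (fun l => l.set (pvChoiceToIdx.getD "Left" 0) 1) = pvMkD a b c 1 e f g h i j k from by
        simp [pvMkD, pvChoiceToIdx, PySem.Dict.modify, PySem.Dict.insert, PySem.Dict.contains, PySem.Dict.getD, PySem.Dict.get?]]
      rw [ih]
      simp [pvMkD, List.mem_cons]
    by_cases h2 : x = "Center"
    · subst h2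
      rw [if_pos (by decide)]
      rw [show (pvMkD a b c d e f g h i j k).modify "active_area_y" [] (fun l => l.set (pvChoiceToIdx.getD "Center" 0) 1) = pvMkD a b c d 1 f g h i j k from by
        simp [pvMkD, pvChoiceToIdx, PySem.Dict.modify, PySem.Dict.insert, PySem.Dict.contains, PySem.Dict.getD, PySem.Dict.get?]]
      rw [ih]
      simp [pvMkD, List.mem_cons]
    by_cases h3 : x = "Right"
    · subst h3
      rw [if_pos (by decide)]
      rw [show (pvMkD a b c d e f g h i j k).modify "active_area_y" [] (fun l => l.set (pvChoiceToIdx.getD "Right" 0) 1) = pvMkD a b c d e 1 g h i j k from by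
        simp [pvMkD, pvChoiceToIdx, PySem.Dict.modify, PySem.Dict.insert, PySem.Dict.contains, PySem.Dict.getD, PySem.Dict.get?]]
      rw [ih]
      simp [pvMkD, List.mem_cons]
    rw [if_neg (by simp [h1, h2, h3])]
    rw [ih]
    simp [pvMkD, List.mem_cons, Ne.symm h1, Ne.symm h2, Ne.symm h3]

theorem pvInnerS (v : List String) (a b c d e f g h i j k : Int) :
    v.foldl (fun fs choice =>
      if choice ∈ (["Goal Area", "Penalty Area"] : List String) then
        fs.modify "shot" [] (fun l => l.set (pvChoiceToIdx.getD choice 0) 1)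
      else fs) (pvMkD a b c d e f g h i j k)
    = pvMkD a b c d e f (if "Goal Area" ∈ v then 1 else g) (if "Penalty Area" ∈ v then 1 else h) i j k := by
  induction v generalizing g h with
  | nil => simp
  | cons x v ih =>
    rw [List.foldl_cons]
    by_cases h1 : x = "Goal Area"
    · subst h1
      rw [if_pos (by decide)]
      rw [show (pvMkD a b c d e f g h i j k).modify "shot" [] (fun l => l.set (pvChoiceToIdx.getD "Goal Area" 0) 1) = pvMkD a b c d e f 1 h i j k from by
        simp [pvMkD, pvChoiceToIdx, PySem.Dict.modify, PySem.Dict.insert, PySem.Dict.contains, PySem.Dict.getD, PySem.Dict.get?]]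
      rw [ih]
      simp [pvMkD, List.mem_cons]
    by_cases h2 : x = "Penalty Area"
    · subst h2
      rw [if_pos (by decide)]
      rw [show (pvMkD a b c d e f g h i j k).modify "shot" [] (fun l => l.set (pvChoiceToIdx.getD "Penalty Area" 0) 1) = pvMkD a b c d e f g 1 i j k from by
        simp [pvMkD, pvChoiceToIdx, PySem.Dict.modify, PySem.Dict.insert, PySem.Dict.contains, PySem.Dict.getD, PySem.Dict.get?]]
      rw [ih]
      simp [pvMkD, List.mem_cons]
    rw [if_neg (by simp [h1, h2])]
    rw [ih]
    simp [pvMkD, List.mem_cons, Ne.symm h1, Ne.symm h2]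

theorem pvInnerM (v : List String) (a b c d e f g h i j k : Int) :
    v.foldl (fun fs choice =>
      if choice ∈ (["Run", "Dribble"] : List String) then
        fs.modify "move" [] (fun l => l.set (pvChoiceToIdx.getD choice 0) 1)
      else fs) (pvMkD a b c d e f g h i j k)
    = pvMkD a b c d e f g h (if "Run" ∈ v then 1 else i) (if "Dribble" ∈ v then 1 else j) k := by
  induction v generalizing i j with
  | nil => simp
  | cons x v ih =>
    rw [List.foldl_cons]
    by_cases h1 : x = "Run"
    · subst h1
      rw [if_pos (by decide)]
      rw [show (pvMkD a b c d e f g h i j k).modify "move" [] (fun l => l.set (pvChoiceToIdx.getD "Run" 0) 1) = pvMkD a b c d e f g h 1 j k from by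
        simp [pvMkD, pvChoiceToIdx, PySem.Dict.modify, PySem.Dict.insert, PySem.Dict.contains, PySem.Dict.getD, PySem.Dict.get?]]
      rw [ih]
      simp [pvMkD, List.mem_cons]
    by_cases h2 : x = "Dribble"
    · subst h2
      rw [if_pos (by decide)]
      rw [show (pvMkD a b c d e f g h i j k).modify "move" [] (fun l => l.set (pvChoiceToIdx.getD "Dribble" 0) 1) = pvMkD a b c d e f g h i 1 k from by
        simp [pvMkD, pvChoiceToIdx, PySem.Dict.modify, PySem.Dict.insert, PySem.Dict.contains, PySem.Dict.getD, PySem.Dict.get?]]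
      rw [ih]
      simp [pvMkD, List.mem_cons]
    rw [if_neg (by simp [h1, h2])]
    rw [ih]
    simp [pvMkD, List.mem_cons, Ne.symm h1, Ne.symm h2]


theorem pvOr_cons (kv : String × List String) (rest : List (String × List String))
    (key c : String) (orig : Int) :
    pvOr (kv :: rest) key c orig
    = pvOr rest key c (if (kv.1 == key && kv.2.contains c) = true then 1 else orig) := by
  unfold pvOr
  rw [List.any_cons]
  by_cases hp : (kv.1 == key && kv.2.contains c) = true
  · rw [if_pos hp, hp, Bool.true_or]
    simp
  · have hf : (kv.1 == key && kv.2.contains c) = false := by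
      revert hp; cases (kv.1 == key && kv.2.contains c) <;> simp
    rw [if_neg hp, hf, Bool.false_or]

theorem pvFoldA (result : List (String × List String)) :
    ∀ a b c d e f g h i j k : Int,
    result.foldl pvStepA (pvMkD a b c d e f g h i j k)
    = pvMkD (pvOr result "Horizontal Position" "Front" a)
        (pvOr result "Horizontal Position" "Midfield" b)
        (pvOr result "Horizontal Position" "Back" c)
        (pvOr result "Vertical Position" "Left" d)
        (pvOr result "Vertical Position" "Center" e)
        (pvOr result "Vertical Position" "Right" f)
        (pvOr result "Shooting Position" "Goal Area" g)
        (pvOr result "Shooting Position" "Penalty Area" h)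
        (pvOr result "Movement Action" "Run" i)
        (pvOr result "Movement Action" "Dribble" j)
        k := by
  induction result with
  | nil => intro a b c d e f g h i j k; simp [pvOr]
  | cons kv rest ih =>
    intro a b c d e f g h i j k
    obtain ⟨key, v⟩ := kv
    rw [List.foldl_cons]
    simp only [pvOr_cons]
    by_cases hH : key = "Horizontal Position"
    · subst hH
      rw [show pvStepA (pvMkD a b c d e f g h i j k) ("Horizontal Position", v)
          = pvMkD (if "Front" ∈ v then 1 else a) (if "Midfield" ∈ v then 1 else b)
              (if "Back" ∈ v then 1 else c) d e f g h i j k from by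
        simp only [pvStepA]
        rw [if_pos (by decide)]
        exact pvInnerH v a b c d e f g h i j k]
      rw [ih]
      simp
    by_cases hV : key = "Vertical Position"
    · subst hV
      rw [show pvStepA (pvMkD a b c d e f g h i j k) ("Vertical Position", v)
          = pvMkD a b c (if "Left" ∈ v then 1 else d) (if "Center" ∈ v then 1 else e)
              (if "Right" ∈ v then 1 else f) g h i j k from by
        simp only [pvStepA]
        rw [if_neg (by decide), if_pos (by decide)]
        exact pvInnerV v a b c d e f g h i j k]
      rw [ih]
      simp
    by_cases hS : key = "Shooting Position"
    · subst hS
      rw [show pvStepA (pvMkD a b c d e f g h i j k) ("Shooting Position", v)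
          = pvMkD a b c d e f (if "Goal Area" ∈ v then 1 else g)
              (if "Penalty Area" ∈ v then 1 else h) i j k from by
        simp only [pvStepA]
        rw [if_neg (by decide), if_neg (by decide), if_pos (by decide)]
        exact pvInnerS v a b c d e f g h i j k]
      rw [ih]
      simp
    by_cases hM : key = "Movement Action"
    · subst hM
      rw [show pvStepA (pvMkD a b c d e f g h i j k) ("Movement Action", v)
          = pvMkD a b c d e f g h (if "Run" ∈ v then 1 else i)
              (if "Dribble" ∈ v then 1 else j) k from by
        simp only [pvStepA]
        rw [if_neg (by decide), if_neg (by decide), if_neg (by decide), if_pos (by decide)]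
        exact pvInnerM v a b c d e f g h i j k]
      rw [ih]
      simp
    rw [show pvStepA (pvMkD a b c d e f g h i j k) (key, v) = pvMkD a b c d e f g h i j k from by
      simp [pvStepA, beq_iff_eq, hH, hV, hS, hM]]
    rw [ih]
    simp [beq_iff_eq, hH, hV, hS, hM]

-- ===== VERDICT (by name: the statement is the Claim_ definition above) =====
theorem word_to_reward_factor_spec : Claim_equal_word_to_reward_factor := by
  intro result _
  show word_to_reward_factor result = word_to_reward_factor_alt result
  unfold word_to_reward_factor word_to_reward_factor_alt
  have : pvFactorsInit = pvMkD 0 0 0 0 0 0 0 0 0 0 0 := rfl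
  rw [this, pvFoldA]
  simp [pvMkD, pvSpec, pvFlag, pvOr]
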